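-- pv_equiv track=rewrite | github.com/JuanLoncharich/Algoritmos2 | practicas/tp-pm/code/pm.py | isPatternContained
-- ===== SOURCE A (Python) =====
-- def isPatternContained(string, pattern, c):
--     i = 0
--     j = 0
--     while i < len(string) and j < len(pattern):
--         if pattern[j] == c or string[i] == pattern[j]:
--             j += 1
--         i += 1
--     return j == len(pattern)
-- ===== SOURCE B (Python) =====
-- def isPatternContained(string, pattern, c):
--     # Dynamic programming over pattern prefixes: dp[j] says whether pattern[:j]
--     # can be matched inside the processed prefix of string; each string character
--     # produces a new table from the old one.
--     m = len(pattern)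
--     dp = [True] + [False] * m
--     for s in string:
--         dp = [True] + [b or (a and (p == c or s == p))
--                        for a, b, p in zip(dp, dp[1:], pattern)]
--     return dp[-1]
-- ===== Notes on version B (the rewrite author's own statement) =====
-- stated objective: alternative
-- what changed: Replaced A's greedy two-pointer scan with a dynamic-programming table over pattern prefixes (dp[j] = pattern[:j] matches in the processed string prefix), rebuilt once per string character.
import Mathlib
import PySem

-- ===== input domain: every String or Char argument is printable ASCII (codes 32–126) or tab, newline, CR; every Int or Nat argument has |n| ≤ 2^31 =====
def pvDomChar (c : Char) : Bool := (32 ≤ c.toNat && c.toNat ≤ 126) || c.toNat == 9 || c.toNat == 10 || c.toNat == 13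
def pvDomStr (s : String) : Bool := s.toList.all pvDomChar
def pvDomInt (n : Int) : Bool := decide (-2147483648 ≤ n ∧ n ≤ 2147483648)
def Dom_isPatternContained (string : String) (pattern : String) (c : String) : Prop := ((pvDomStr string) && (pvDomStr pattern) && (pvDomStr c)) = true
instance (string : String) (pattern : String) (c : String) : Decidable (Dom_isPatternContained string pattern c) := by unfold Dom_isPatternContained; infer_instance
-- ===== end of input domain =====

-- B replaces A's greedy two-pointer scan with a dynamic-programming table over pattern
-- prefixes, recomputed once per string character (alternative algorithm, same result).

-- ===== PORT A =====
-- A's while loop: i scans `string`, j scans `pattern`; j advances when pattern[j] == c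
-- (1-char string compared to c, ported as cl == [p]) or string[i] == pattern[j]; i always
-- advances; returns j == len(pattern).
def pvGoA (cl : List Char) : List Char → List Char → Bool
  | [], ps => ps.isEmpty
  | _ :: _, [] => true
  | s :: ss, p :: ps => if cl == [p] || s == p then pvGoA cl ss ps else pvGoA cl ss (p :: ps)

def isPatternContained (string : String) (pattern : String) (c : String) : Bool :=
  pvGoA c.toList string.toList pattern.toList

-- ===== PORT B =====
-- B (Source B): dp[j] says whether pattern[:j] matches inside the processed string prefix;
-- per string char s the comprehension `[b or (a and (p == c or s == p)) for a, b, p in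
-- zip(dp, dp[1:], pattern)]` builds the new table; returns dp[m].
-- pvRowB is the zip-comprehension: simultaneous recursion over dp, dp[1:], pattern.
def pvRowB (cl : List Char) (s : Char) : List Bool → List Bool → List Char → List Bool
  | a :: as, b :: bs, p :: ps => (b || (a && (cl == [p] || s == p))) :: pvRowB cl s as bs ps
  | _, _, _ => []

def isPatternContained_alt (string : String) (pattern : String) (c : String) : Bool :=
  -- dp0 = [True] + [False]*m; the fold is the `for s in string` loop; the result is dp[m]
  -- (always in range: dp has length m+1, so .getD false is never the fallback).
  (PySem.List.pyGet?
    (string.toList.foldl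
      (fun dp s => true :: pvRowB c.toList s dp (dp.drop 1) pattern.toList)
      (true :: List.replicate pattern.toList.length false))
    (pattern.toList.length : Int)).getD false

-- ===== PRECONDITION & SPEC =====
def Spec_isPatternContained (string : String) (pattern : String) (c : String) (out : Bool) : Prop := out = isPatternContained_alt string pattern c
instance (string : String) (pattern : String) (c : String) (out : Bool) : Decidable (Spec_isPatternContained string pattern c out) := by unfold Spec_isPatternContained; infer_instance

-- ===== CLAIM (what is proved, stated in full; the proofs are below) =====
def Claim_equal_isPatternContained : Prop := ∀ (string : String) (pattern : String) (c : String), Dom_isPatternContained string pattern c → Spec_isPatternContained string pattern c (isPatternContained string pattern c)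

-- ===== LEMMAS AND PROOFS =====

-- Reference semantics: backtracking subsequence-with-wildcard matcher.
def pvSub (cl : List Char) : List Char → List Char → Bool
  | _, [] => true
  | [], _ :: _ => false
  | s :: ss, p :: ps => ((cl == [p] || s == p) && pvSub cl ss ps) || pvSub cl ss (p :: ps)

theorem pvSub_nil_right (cl ss : List Char) : pvSub cl ss [] = true := by
  cases ss <;> rfl

theorem pvSub_tail (cl : List Char) (ss : List Char) :
    ∀ p ps, pvSub cl ss (p :: ps) = true → pvSub cl ss ps = true := by
  induction ss with
  | nil => intro p ps h; simp [pvSub] at h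
  | cons t ss ih =>
    intro p ps h
    cases ps with
    | nil => exact pvSub_nil_right cl (t :: ss)
    | cons q qs =>
      simp only [pvSub, Bool.or_eq_true, Bool.and_eq_true] at h ⊢
      rcases h with ⟨_, h2⟩ | h
      · exact Or.inr h2
      · exact Or.inr (ih p (q :: qs) h)

theorem pvGoA_eq_pvSub (cl : List Char) (ss : List Char) :
    ∀ ps, pvGoA cl ss ps = pvSub cl ss ps := by
  induction ss with
  | nil => intro ps; cases ps <;> rfl
  | cons s ss ih =>
    intro ps
    cases ps with
    | nil => rfl
    | cons p ps =>
      by_cases h : (cl == [p] || s == p) = true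
      · simp only [pvGoA, pvSub, h, if_true, Bool.true_and]
        rw [ih ps]
        cases h2 : pvSub cl ss (p :: ps)
        · simp
        · simp [pvSub_tail cl ss p ps h2]
      · simp only [pvGoA, pvSub, h, Bool.false_and, Bool.false_or, Bool.not_eq_true] at *
        simp [ih (p :: ps)]

-- snoc recurrence: appending one char s to the string, one char p to the pattern.
theorem pvSub_snoc (cl : List Char) (s p : Char) (ss : List Char) :
    ∀ pre, pvSub cl (ss ++ [s]) (pre ++ [p]) =
      (pvSub cl ss (pre ++ [p]) || (pvSub cl ss pre && (cl == [p] || s == p))) := by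
  induction ss with
  | nil =>
    intro pre
    cases pre with
    | nil => cases h : (cl == [p] || s == p) <;> simp [pvSub, h]
    | cons q pre =>
      have h1 : ∀ (x : Char) (l : List Char), pvSub cl [] (x :: l) = false := fun _ _ => rfl
      have h3 : pvSub cl [] (pre ++ [p]) = false := by cases pre <;> rfl
      simp only [List.nil_append, List.cons_append, pvSub, h1, h3]
      simp
  | cons t ss ih =>
    intro pre
    cases pre with
    | nil =>
      simp only [List.nil_append, List.cons_append, pvSub, pvSub_nil_right]
      rw [show ([p] : List Char) = [] ++ [p] from rfl, ih []]
      simp only [List.nil_append, pvSub_nil_right]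
      cases (cl == [p] || t == p) <;> cases (cl == [p] || s == p) <;>
        cases pvSub cl ss [p] <;> simp
    | cons q pre =>
      simp only [List.cons_append, pvSub]
      rw [ih pre, show q :: (pre ++ [p]) = (q :: pre) ++ [p] from rfl, ih (q :: pre)]
      cases (cl == [q] || t == q) <;> cases (cl == [p] || s == p) <;>
        cases pvSub cl ss (pre ++ [p]) <;> cases pvSub cl ss pre <;>
        cases pvSub cl ss ((q :: pre) ++ [p]) <;> cases pvSub cl ss (q :: pre) <;> simp

-- The table of pvSub values on successive pattern prefixes (dp in Source B).
def pvTbl (cl ss pre : List Char) : List Char → List Bool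
  | [] => [pvSub cl ss pre]
  | p :: ps => pvSub cl ss pre :: pvTbl cl ss (pre ++ [p]) ps

theorem pvTbl_head_tail (cl ss pre ps : List Char) :
    pvTbl cl ss pre ps = pvSub cl ss pre :: (pvTbl cl ss pre ps).drop 1 := by
  cases ps <;> rfl

theorem pvRowB_spec (cl : List Char) (s : Char) (ss : List Char) :
    ∀ ps pre, pvRowB cl s (pvTbl cl ss pre ps) ((pvTbl cl ss pre ps).drop 1) ps =
      (pvTbl cl (ss ++ [s]) pre ps).drop 1 := by
  intro ps
  induction ps with
  | nil => intro pre; rfl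
  | cons p ps ih =>
    intro pre
    rw [show pvTbl cl ss pre (p :: ps) = pvSub cl ss pre :: pvTbl cl ss (pre ++ [p]) ps from rfl]
    rw [pvTbl_head_tail cl ss (pre ++ [p]) ps]
    simp only [List.drop_succ_cons, List.drop_zero, pvRowB]
    rw [← pvTbl_head_tail cl ss (pre ++ [p]) ps, ih (pre ++ [p])]
    rw [show pvTbl cl (ss ++ [s]) pre (p :: ps)
        = pvSub cl (ss ++ [s]) pre :: pvTbl cl (ss ++ [s]) (pre ++ [p]) ps from rfl]
    simp only [List.drop_succ_cons, List.drop_zero]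
    rw [pvTbl_head_tail cl (ss ++ [s]) (pre ++ [p]) ps, pvSub_snoc]
    simp

theorem pvTbl_nil_cons (cl : List Char) :
    ∀ (ps pre : List Char) (q : Char),
      pvTbl cl [] (q :: pre) ps = List.replicate (ps.length + 1) false := by
  intro ps
  induction ps with
  | nil => intro pre q; rfl
  | cons p ps ih =>
    intro pre q
    show pvSub cl [] (q :: pre) :: pvTbl cl [] ((q :: pre) ++ [p]) ps = _
    rw [show (q :: pre) ++ [p] = q :: (pre ++ [p]) from rfl, ih (pre ++ [p]) q]
    rfl

theorem pvTbl_nil (cl ps : List Char) :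
    pvTbl cl [] [] ps = true :: List.replicate ps.length false := by
  cases ps with
  | nil => rfl
  | cons p ps =>
    show pvSub cl [] [] :: pvTbl cl [] [p] ps = _
    rw [show ([p] : List Char) = (p :: []) from rfl, pvTbl_nil_cons cl ps [] p]
    rfl

theorem pvFold_tbl (cl ps : List Char) :
    ∀ (S ss : List Char),
      S.foldl (fun dp s => true :: pvRowB cl s dp (dp.drop 1) ps) (pvTbl cl ss [] ps) =
        pvTbl cl (ss ++ S) [] ps := by
  intro S
  induction S with
  | nil => intro ss; simp
  | cons s S ih =>
    intro ss
    have hstep : true :: pvRowB cl s (pvTbl cl ss [] ps) ((pvTbl cl ss [] ps).drop 1) ps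
        = pvTbl cl (ss ++ [s]) [] ps := by
      rw [pvRowB_spec cl s ss ps []]
      conv_rhs => rw [pvTbl_head_tail cl (ss ++ [s]) [] ps]
      rw [pvSub_nil_right]
    simp only [List.foldl_cons]
    rw [hstep, ih (ss ++ [s])]
    simp

theorem pvTbl_get (cl ss : List Char) :
    ∀ ps pre, (pvTbl cl ss pre ps)[ps.length]? = some (pvSub cl ss (pre ++ ps)) := by
  intro ps
  induction ps with
  | nil => intro pre; simp [pvTbl]
  | cons p ps ih =>
    intro pre
    show (pvSub cl ss pre :: pvTbl cl ss (pre ++ [p]) ps)[ps.length + 1]? = _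
    rw [List.getElem?_cons_succ, ih (pre ++ [p])]
    simp

-- ===== VERDICT (by name: the statement is the Claim_ definition above) =====
theorem isPatternContained_spec : Claim_equal_isPatternContained := by
  intro string pattern c _
  unfold Spec_isPatternContained isPatternContained isPatternContained_alt
  rw [pvGoA_eq_pvSub]
  rw [show (true :: List.replicate pattern.toList.length false)
      = pvTbl c.toList [] [] pattern.toList from (pvTbl_nil _ _).symm]
  rw [pvFold_tbl c.toList pattern.toList string.toList []]
  rw [PySem.List.pyGet?_natCast, List.nil_append, pvTbl_get c.toList string.toList pattern.toList []]
  rfl
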